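-- pv_equiv track=rewrite | github.com/umangkumarr/CodeJunkDrawer | Absolute Junk/Python/stringcal.py | strcal
-- ===== SOURCE A (Python) =====
-- def strcal(t):
--     m=[]
--     for i in range(1,len(t)+1):
--         l=[]
--         for j in range(0,len(t)-i+1):
--             f=t[j:i+j]
--             l.append(f)
--         s=l.copy()
--         s=set(s)
--         y=0
--         for k in s:
--             g=l.count(k)
--             if g>y:
--                 y=g
--         m.append(i*y)
--     return max(m)
-- ===== SOURCE B (Python) =====
-- def strcal(t):
--     # Sort each length's windows, then take the longest run of equal neighbours:
--     # grouping by sorted order replaces A's set + repeated list.count rescans.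
--     n = len(t)
--     best = 0
--     for i in range(1, n + 1):
--         ws = sorted(t[j:j+i] for j in range(n - i + 1))
--         y = 0
--         k = 0
--         while k < len(ws):
--             e = k + 1
--             while e < len(ws) and ws[e] == ws[k]:
--                 e += 1
--             if e - k > y:
--                 y = e - k
--             k = e
--         best = max(best, i * y)
--     return best
-- ===== Notes on version B (the rewrite author's own statement) =====
-- stated objective: faster
-- what changed: Per window length, B sorts the windows once and scans for the longest run of equal neighbours (sort-then-scan grouping), instead of A's building the window list, taking its set and rescanning the whole list with list.count for every distinct window; B also keeps a running maximum instead of A's result list plus final max().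
import Mathlib
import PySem

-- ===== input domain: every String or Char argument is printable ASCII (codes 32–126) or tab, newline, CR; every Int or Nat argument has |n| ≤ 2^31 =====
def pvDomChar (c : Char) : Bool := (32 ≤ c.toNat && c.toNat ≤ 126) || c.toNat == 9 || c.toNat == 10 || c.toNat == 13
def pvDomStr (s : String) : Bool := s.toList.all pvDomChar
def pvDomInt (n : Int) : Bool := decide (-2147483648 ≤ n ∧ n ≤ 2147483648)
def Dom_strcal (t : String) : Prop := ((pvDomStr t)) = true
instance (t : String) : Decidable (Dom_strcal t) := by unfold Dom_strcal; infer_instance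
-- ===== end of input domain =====

-- B sorts each length's windows and scans the longest run of equal neighbours (grouping by
-- sorted order) instead of A's set + repeated list.count rescans (objective: faster).

-- ===== PORT A =====
def strcal (t : String) : Int :=
  let m := (PySem.List.pyRange 1 (PySem.Str.len t + 1)).foldl (fun m i =>
    let l := (PySem.List.pyRange 0 (PySem.Str.len t - i + 1)).foldl
      (fun l j => l ++ [PySem.Str.slice t (some j) (some (i + j))]) []
    let s := PySem.Set.ofList l
    let y := s.foldl (fun y k =>
      let g : Int := (l.count k : Int)
      if g > y then g else y) 0
    m ++ [i * y]) []
  (PySem.List.max? m (fun x => x)).getD 0   -- max(m); none = ValueError on empty t, excluded by Pre_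

-- ===== PORT B =====
-- B's inner while-loop advances k run by run over the sorted list ws; each iteration is one
-- run of elements equal to ws[k] (length e-k = 1 + takeWhile) followed by the rest (dropWhile):
-- ported as this recursion on the remaining list, exact step for step.
def maxRunLoop : List String → Int → Int
  | [], y => y
  | x :: xs, y =>
    let r : Int := 1 + ((xs.takeWhile (fun w => w == x)).length : Int)   -- e - k
    maxRunLoop (xs.dropWhile (fun w => w == x)) (if r > y then r else y)
termination_by l _ => l.length
decreasing_by
  exact Nat.lt_succ_of_le (List.length_dropWhile_le _ _)

def strcal_alt (t : String) : Int :=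
  let n := PySem.Str.len t
  (PySem.List.pyRange 1 (n + 1)).foldl (fun best i =>
    let ws := PySem.List.sorted ((PySem.List.pyRange 0 (n - i + 1)).map
      (fun j => PySem.Str.slice t (some j) (some (j + i)))) (fun x => x) false
    let y := maxRunLoop ws 0
    max best (i * y)) 0

-- ===== PRECONDITION & SPEC =====
-- Pre_ excludes only the empty string, on which Python A raises ValueError (max of an empty list).
def Pre_strcal (t : String) : Prop := t ≠ ""
instance (t : String) : Decidable (Pre_strcal t) := by unfold Pre_strcal; infer_instance
def pvWitness_strcal : String := "aba"

def Spec_strcal (t : String) (out : Int) : Prop := out = strcal_alt t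
instance (t : String) (out : Int) : Decidable (Spec_strcal t out) := by unfold Spec_strcal; infer_instance

-- ===== CLAIM (what is proved, stated in full; the proofs are below) =====
def Claim_equal_strcal : Prop := ∀ (t : String), Dom_strcal t → Pre_strcal t → Spec_strcal t (strcal t)

-- ===== LEMMAS AND PROOFS =====

-- max of a list of Ints, floored at 0
def mx0 (l : List Int) : Int := l.foldl max 0

theorem le_mx0 (l : List Int) : 0 ≤ mx0 l ∧ ∀ x ∈ l, x ≤ mx0 l :=
  PySem.List.le_foldl_max l 0

theorem mx0_le (l : List Int) (b : Int) (h0 : 0 ≤ b) (h : ∀ x ∈ l, x ≤ b) : mx0 l ≤ b := by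
  rcases PySem.List.foldl_max_mem l 0 with he | hm
  · show List.foldl max 0 l ≤ b
    rw [he]; exact h0
  · exact h _ hm

theorem mx0_ext (l1 l2 : List Int) (h : ∀ x, x ∈ l1 ↔ x ∈ l2) : mx0 l1 = mx0 l2 := by
  apply le_antisymm
  · exact mx0_le l1 _ (le_mx0 l2).1 (fun x hx => (le_mx0 l2).2 x ((h x).mp hx))
  · exact mx0_le l2 _ (le_mx0 l1).1 (fun x hx => (le_mx0 l1).2 x ((h x).mpr hx))

-- "max multiplicity" of a list of strings
def S (l : List String) : Int := mx0 (l.map (fun x => (l.count x : Int)))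

theorem S_nonneg (l : List String) : 0 ≤ S l := (le_mx0 _).1

-- A's set-scan maximum of counts equals S
theorem yA_eq_S (l : List String) :
    (PySem.Set.ofList l).foldl (fun y k =>
      if (l.count k : Int) > y then (l.count k : Int) else y) 0 = S l := by
  have h1 : (PySem.Set.ofList l).foldl (fun y k =>
      if (l.count k : Int) > y then (l.count k : Int) else y) 0
      = (PySem.Set.ofList l).foldl (fun y k => max y ((l.count k : Int))) 0 := by
    apply PySem.List.foldl_congr_mem
    intro acc x _
    by_cases hle : (l.count x : Int) ≤ acc
    · rw [if_neg (by omega), max_eq_left hle]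
    · rw [if_pos (by omega), max_eq_right (by omega)]
  rw [h1]
  have h2 : (PySem.Set.ofList l).foldl (fun y k => max y ((l.count k : Int))) 0
      = mx0 ((PySem.Set.ofList l).map (fun k => ((l.count k : Int)))) := by
    rw [mx0, List.foldl_map]
  rw [h2]
  apply mx0_ext
  intro v
  simp only [List.mem_map, PySem.Set.mem_ofList]

-- S is invariant under permutation
theorem S_perm (l1 l2 : List String) (h : l1.Perm l2) : S l1 = S l2 := by
  unfold S
  have hc : ∀ x, l1.count x = l2.count x := fun x => h.count_eq x
  apply mx0_ext
  intro v
  simp only [List.mem_map, hc]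
  exact ⟨fun ⟨x, hx, he⟩ => ⟨x, h.mem_iff.mp hx, he⟩,
         fun ⟨x, hx, he⟩ => ⟨x, h.mem_iff.mpr hx, he⟩⟩

-- in a sorted list, everything after the run of leading x's is strictly greater than x
theorem dropWhile_gt (x : String) (xs : List String)
    (hall : ∀ w ∈ xs, x ≤ w) (hp : xs.Pairwise (· ≤ ·)) :
    ∀ w ∈ xs.dropWhile (fun v => v == x), x < w := by
  induction xs with
  | nil => intro w hw; simp [List.dropWhile] at hw
  | cons z zs ih =>
    intro w hw
    by_cases hz : z = x
    · rw [List.dropWhile_cons, if_pos (by simp [hz])] at hw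
      exact ih (fun v hv => hall v (List.mem_cons_of_mem _ hv)) hp.of_cons w hw
    · rw [List.dropWhile_cons, if_neg (by simp [hz])] at hw
      have hxz : x < z := lt_of_le_of_ne (hall z List.mem_cons_self) (Ne.symm hz)
      rcases List.mem_cons.mp hw with rfl | hw'
      · exact hxz
      · exact lt_of_lt_of_le hxz ((List.pairwise_cons.mp hp).1 w hw')

-- B's run scan over a sorted list computes max y (S l)
theorem maxRunLoop_eq (l : List String) (y : Int) (hy : 0 ≤ y)
    (hp : l.Pairwise (· ≤ ·)) : maxRunLoop l y = max y (S l) := by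
  induction l, y using maxRunLoop.induct with
  | case1 y =>
    rw [maxRunLoop]
    simp [S, mx0, max_eq_left hy]
  | case2 x xs y r ih =>
    rw [maxRunLoop]
    set tW := xs.takeWhile (fun w => w == x) with htW
    set dW := xs.dropWhile (fun w => w == x) with hdW
    have hall : ∀ w ∈ xs, x ≤ w := (List.pairwise_cons.mp hp).1
    have hgt : ∀ w ∈ dW, x < w := dropWhile_gt x xs hall hp.of_cons
    have hsplit : tW ++ dW = xs := List.takeWhile_append_dropWhile
    have htWx : ∀ w ∈ tW, w = x := by
      intro w hw
      have := List.mem_takeWhile_imp hw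
      simpa using this
    have hr : r = 1 + (tW.length : Int) := rfl
    have hr1 : (1 : Int) ≤ r := by
      rw [hr]; have := Int.natCast_nonneg tW.length; omega
    -- counts in x :: xs
    have hcx : ((x :: xs).count x : Int) = r := by
      rw [List.count_cons_self, ← hsplit, List.count_append]
      have h1 : tW.count x = tW.length := by
        rw [List.count_eq_length]
        intro w hw; exact ((htWx w hw) ▸ rfl : x = w) ▸ rfl
      have h2 : dW.count x = 0 := by
        rw [List.count_eq_zero]
        intro hx; exact absurd (hgt x hx) (lt_irrefl x)
      rw [h1, h2, hr]; push_cast; ring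
    have hcd : ∀ w ∈ dW, (x :: xs).count w = dW.count w := by
      intro w hw
      have hwx : w ≠ x := fun he => absurd (he ▸ hgt w hw) (lt_irrefl x)
      have h0 : tW.count w = 0 := List.count_eq_zero.mpr (fun hwt => hwx (htWx w hwt))
      rw [← hsplit]
      simp [List.count_append, h0, Ne.symm hwx]
    -- S (x :: xs) = max r (S dW)
    have hS : S (x :: xs) = max r (S dW) := by
      apply le_antisymm
      · apply mx0_le
        · exact le_max_of_le_left (by omega)
        · intro v hv
          rcases List.mem_map.mp hv with ⟨w, hw, rfl⟩
          rcases List.mem_cons.mp hw with rfl | hw'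
          · rw [hcx]; exact le_max_left _ _
          · rcases List.mem_append.mp (hsplit ▸ hw' : w ∈ tW ++ dW) with hwt | hwd
            · rw [htWx w hwt, hcx]; exact le_max_left _ _
            · refine le_max_of_le_right ?_
              rw [hcd w hwd]
              exact (le_mx0 _).2 _ (List.mem_map.mpr ⟨w, hwd, rfl⟩)
      · apply max_le
        · rw [← hcx]
          exact (le_mx0 _).2 _ (List.mem_map.mpr ⟨x, List.mem_cons_self, rfl⟩)
        · apply mx0_le _ _ (S_nonneg _)
          intro v hv
          rcases List.mem_map.mp hv with ⟨w, hw, rfl⟩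
          rw [← hcd w hw]
          exact (le_mx0 _).2 _
            (List.mem_map.mpr ⟨w, List.mem_cons_of_mem _ (hsplit ▸ List.mem_append_right tW hw), rfl⟩)
    have hpd : dW.Pairwise (· ≤ ·) := hp.of_cons.sublist (List.dropWhile_sublist _)
    have hy' : (0 : Int) ≤ if r > y then r else y := by split_ifs <;> omega
    have hite : (if r > y then r else y) = max y r := by
      split_ifs with hc
      · exact (max_eq_right hc.le).symm
      · exact (max_eq_left (by omega)).symm
    simp only [dite_eq_ite] at ih
    rw [← hr, ih hy' hpd, hS, hite, max_assoc]

-- max(m) of the per-length values equals the running maximum starting at 0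
theorem outer_max (v : Int → Int) (a b : Int) (hab : a < b) (hv : 0 ≤ v a) :
    (PySem.List.max? ((PySem.List.pyRange a b).map v) (fun x => x)).getD 0
    = (PySem.List.pyRange a b).foldl (fun best i => max best (v i)) 0 := by
  rw [PySem.List.pyRange_one_cons hab]
  simp only [List.map_cons, PySem.List.max?_id_cons, List.foldl_cons, Option.getD_some]
  rw [max_eq_right hv]
  exact List.foldl_map

-- B's inner per-length value equals A's inner per-length value
theorem inner_eq (t : String) (i : Int) :
    maxRunLoop (PySem.List.sorted ((PySem.List.pyRange 0 (PySem.Str.len t - i + 1)).map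
      (fun j => PySem.Str.slice t (some j) (some (j + i)))) (fun x => x) false) 0
    = (PySem.Set.ofList ((PySem.List.pyRange 0 (PySem.Str.len t - i + 1)).map
        (fun j => PySem.Str.slice t (some j) (some (i + j))))).foldl
        (fun y k =>
          if ((((PySem.List.pyRange 0 (PySem.Str.len t - i + 1)).map
              (fun j => PySem.Str.slice t (some j) (some (i + j)))).count k : Int) > y)
          then (((PySem.List.pyRange 0 (PySem.Str.len t - i + 1)).map
              (fun j => PySem.Str.slice t (some j) (some (i + j)))).count k : Int)
          else y) 0 := by
  have hmap : (PySem.List.pyRange 0 (PySem.Str.len t - i + 1)).map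
      (fun j => PySem.Str.slice t (some j) (some (j + i)))
      = (PySem.List.pyRange 0 (PySem.Str.len t - i + 1)).map
      (fun j => PySem.Str.slice t (some j) (some (i + j))) := by
    apply List.map_congr_left
    intro j _
    rw [Int.add_comm j i]
  rw [hmap,
      maxRunLoop_eq _ 0 le_rfl (by
        simpa using PySem.List.sorted_pairwise
          ((PySem.List.pyRange 0 (PySem.Str.len t - i + 1)).map
            (fun j => PySem.Str.slice t (some j) (some (i + j)))) (fun x => x)),
      max_eq_right (S_nonneg _),
      S_perm _ _ (PySem.List.sorted_perm _ (fun x => x) false),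
      ← yA_eq_S]

theorem strcal_spec' (t : String) (h : t ≠ "") : strcal t = strcal_alt t := by
  have ht : t.toList ≠ [] := fun hnil => h (String.toList_eq_nil_iff.mp hnil)
  have hlen := List.length_pos_of_ne_nil ht
  have hn : 1 ≤ PySem.Str.len t := by rw [PySem.Str.len_eq]; omega
  simp only [strcal, strcal_alt, PySem.List.foldl_append_singleton_eq_map, List.nil_append]
  rw [outer_max _ 1 (PySem.Str.len t + 1) (by omega)
    (by rw [yA_eq_S]; have := S_nonneg ((PySem.List.pyRange 0 (PySem.Str.len t - 1 + 1)).map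
          (fun j => PySem.Str.slice t (some j) (some (1 + j)))); omega)]
  apply PySem.List.foldl_congr_mem
  intro acc i _
  rw [inner_eq t i]

-- ===== VERDICT (by name: the statement is the Claim_ definition above) =====
theorem strcal_spec : Claim_equal_strcal := by
  intro t _ hp
  unfold Spec_strcal
  exact strcal_spec' t hp
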